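-- pv_equiv track=rewrite | github.com/Mithrasri-Kadarla/Summer-Training-2024 | 15th June 2024/number of island.py | no_islands
-- ===== SOURCE A (Python) =====
-- def no_islands(grid):
--     c=0
--     rows=len(grid)
--     cols=len(grid[0])
--     mx=0
--     def dfs(i,j):
--         if i<0 or j<0 or i>=rows or j>=cols or grid[i][j]!="1":
--             return 0
--         grid[i][j]="0"
--         a=1
--         a+=dfs(i-1,j)
--         a+=dfs(i+1,j)
--         a+=dfs(i,j-1)
--         a+=dfs(i,j+1)
--         return a
--     for i in range(rows):
--         for j in range(cols):
--             if grid[i][j]=="1":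
--                 c+=1
--                 i_a=dfs(i,j)
--                 mx=max(mx,i_a)
--     return c,mx
-- ===== SOURCE B (Python) =====
-- def no_islands(grid):
--     c = 0
--     rows = len(grid)
--     cols = len(grid[0])
--     mx = 0
--     for i in range(rows):
--         for j in range(cols):
--             if grid[i][j] == "1":
--                 c += 1
--                 size = 0
--                 stack = [(i, j)]
--                 while stack:
--                     x, y = stack.pop()
--                     if x < 0 or y < 0 or x >= rows or y >= cols or grid[x][y] != "1":
--                         continue
--                     grid[x][y] = "0"
--                     size += 1
--                     stack.extend([(x, y + 1), (x, y - 1), (x + 1, y), (x - 1, y)])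
--                 mx = max(mx, size)
--     return c, mx
-- ===== Notes on version B (the rewrite author's own statement) =====
-- stated objective: alternative
-- what changed: the recursive dfs flood fill is replaced by an iterative explicit-stack flood fill (cells marked and counted on pop, neighbours pushed), removing recursion entirely
import Mathlib
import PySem

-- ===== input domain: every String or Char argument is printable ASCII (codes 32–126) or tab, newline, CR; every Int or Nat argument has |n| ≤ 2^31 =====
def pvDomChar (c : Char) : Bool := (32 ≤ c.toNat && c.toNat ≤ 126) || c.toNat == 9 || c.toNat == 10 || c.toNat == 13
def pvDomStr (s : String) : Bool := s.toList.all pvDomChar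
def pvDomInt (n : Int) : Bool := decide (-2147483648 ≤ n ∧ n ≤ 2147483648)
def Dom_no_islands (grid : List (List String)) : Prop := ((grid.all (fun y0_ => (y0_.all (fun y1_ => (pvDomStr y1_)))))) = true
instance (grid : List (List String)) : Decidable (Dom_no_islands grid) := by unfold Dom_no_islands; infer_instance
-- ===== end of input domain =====

-- Both programs flood-fill the grid; A does it with a recursive dfs, B with an explicit stack.
-- NOTE: the Python A mutates its argument (zeroes visited cells); B performs the same mutation.
-- The equivalence proved here is about the RETURN value (count of islands, max island size).

-- grid[i][j] as both ports read it after their bounds checks (indices proven non-negative there)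
def cellAt (g : List (List String)) (i j : Int) : String :=
  (g.getD i.toNat []).getD j.toNat ""

-- grid[i][j] = "0"
def setCell (g : List (List String)) (i j : Int) : List (List String) :=
  g.set i.toNat ((g.getD i.toNat []).set j.toNat "0")

-- number of "1" cells; termination measure for the flood fills
def ones (g : List (List String)) : Nat := (g.map (fun r => r.count "1")).sum

theorem row_count_lt : ∀ (r : List String) (j : Nat), r.getD j "" = "1" →
    (r.set j "0").count "1" < r.count "1" := by
  intro r
  induction r with
  | nil => intro j h; simp [List.getD] at h
  | cons a t ih =>
    intro j h
    cases j with
    | zero =>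
      simp [List.getD] at h
      subst h
      simp
    | succ j =>
      simp [List.getD] at h
      have := ih j (by simpa [List.getD] using h)
      simp only [List.set, List.count_cons]
      omega

theorem ones_set_lt : ∀ (g : List (List String)) (i j : Nat),
    (g.getD i []).getD j "" = "1" →
    ones (g.set i ((g.getD i []).set j "0")) < ones g := by
  intro g
  induction g with
  | nil => intro i j h; simp [List.getD] at h
  | cons r t ih =>
    intro i j h
    cases i with
    | zero =>
      simp [List.getD] at h ⊢
      have := row_count_lt r j h
      simp [ones]
      omega
    | succ i =>
      simp [List.getD] at h ⊢
      have := ih i j (by simpa [List.getD] using h)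
      simp [ones] at this ⊢
      omega

theorem ones_setCell_lt (g : List (List String)) (i j : Int)
    (h : cellAt g i j = "1") : ones (setCell g i j) < ones g := by
  exact ones_set_lt g i.toNat j.toNat h

-- ===== PORT A =====
-- fuel-totalized port of the recursive dfs; fuel ones g + 1 bounds the recursion depth
def dfs (rows cols : Int) : Nat → List (List String) → Int → Int → List (List String) × Int
  | 0, g, _, _ => (g, 0)
  | Nat.succ n, g, i, j =>
    if i < 0 ∨ j < 0 ∨ rows ≤ i ∨ cols ≤ j ∨ cellAt g i j ≠ "1" then (g, 0)
    else
      let g0 := setCell g i j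
      let p1 := dfs rows cols n g0 (i-1) j
      let p2 := dfs rows cols n p1.1 (i+1) j
      let p3 := dfs rows cols n p2.1 i (j-1)
      let p4 := dfs rows cols n p3.1 i (j+1)
      (p4.1, 1 + p1.2 + p2.2 + p3.2 + p4.2)

def no_islands (grid : List (List String)) : Int × Int :=
  let rows : Int := grid.length
  let cols : Int := (grid.headD []).length
  let s := (PySem.List.pyRange 0 rows 1).foldl (fun s i =>
      (PySem.List.pyRange 0 cols 1).foldl (fun s j =>
        if cellAt s.1 i j = "1" then
          let p := dfs rows cols (ones s.1 + 1) s.1 i j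
          (p.1, s.2.1 + 1, max s.2.2 p.2)
        else s) s) (grid, (0 : Int), (0 : Int))
  (s.2.1, s.2.2)

-- ===== PORT B =====
-- iterative flood fill with an explicit stack (head of the list = top of the stack)
def loopFill (rows cols : Int) (g : List (List String)) (st : List (Int × Int)) (size : Int) :
    List (List String) × Int :=
  match st with
  | [] => (g, size)
  | (i, j) :: rest =>
    if h : i < 0 ∨ j < 0 ∨ rows ≤ i ∨ cols ≤ j ∨ cellAt g i j ≠ "1" then
      loopFill rows cols g rest size
    else
      loopFill rows cols (setCell g i j)
        ((i-1, j) :: (i+1, j) :: (i, j-1) :: (i, j+1) :: rest) (size + 1)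
termination_by (ones g, st.length)
decreasing_by
  · exact Prod.Lex.right _ (by simp)
  · exact Prod.Lex.left _ _ (ones_setCell_lt g i j (by push_neg at h; exact h.2.2.2.2))

def no_islands_alt (grid : List (List String)) : Int × Int :=
  let rows : Int := grid.length
  let cols : Int := (grid.headD []).length
  let s := (PySem.List.pyRange 0 rows 1).foldl (fun s i =>
      (PySem.List.pyRange 0 cols 1).foldl (fun s j =>
        if cellAt s.1 i j = "1" then
          let p := loopFill rows cols s.1 [(i, j)] 0
          (p.1, s.2.1 + 1, max s.2.2 p.2)
        else s) s) (grid, (0 : Int), (0 : Int))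
  (s.2.1, s.2.2)

-- ===== PRECONDITION & SPEC =====
-- Pre_ excludes exactly the inputs on which the Python A raises IndexError:
-- the empty grid (len(grid[0])) and grids with a row shorter than the first row.
def Pre_no_islands (grid : List (List String)) : Prop :=
  grid ≠ [] ∧ ∀ r ∈ grid, (grid.headD []).length ≤ r.length
instance (grid : List (List String)) : Decidable (Pre_no_islands grid) := by
  unfold Pre_no_islands; infer_instance

def pvWitness_no_islands : List (List String) := [["1", "0"], ["0", "1"]]

def Spec_no_islands (grid : List (List String)) (out : Int × Int) : Prop := out = no_islands_alt grid
instance (grid : List (List String)) (out : Int × Int) : Decidable (Spec_no_islands grid out) := by unfold Spec_no_islands; infer_instance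

-- ===== CLAIM (what is proved, stated in full; the proofs are below) =====
def Claim_equal_no_islands : Prop := ∀ (grid : List (List String)), Dom_no_islands grid → Pre_no_islands grid → Spec_no_islands grid (no_islands grid)

-- ===== LEMMAS AND PROOFS =====

theorem dfs_succ (rows cols : Int) (n : Nat) (g : List (List String)) (i j : Int) :
    dfs rows cols (n + 1) g i j =
      (if i < 0 ∨ j < 0 ∨ rows ≤ i ∨ cols ≤ j ∨ cellAt g i j ≠ "1" then (g, 0)
       else
         let g0 := setCell g i j
         let p1 := dfs rows cols n g0 (i-1) j
         let p2 := dfs rows cols n p1.1 (i+1) j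
         let p3 := dfs rows cols n p2.1 i (j-1)
         let p4 := dfs rows cols n p3.1 i (j+1)
         (p4.1, 1 + p1.2 + p2.2 + p3.2 + p4.2)) := rfl

-- dfs never increases the number of "1" cells
theorem dfs_ones_le : ∀ (n : Nat) (rows cols : Int) (g : List (List String)) (i j : Int),
    ones (dfs rows cols n g i j).1 ≤ ones g := by
  intro n
  induction n with
  | zero => intro rows cols g i j; simp [dfs]
  | succ n ih =>
    intro rows cols g i j
    rw [dfs]
    split
    · simp
    · rename_i h
      push_neg at h
      have h0 := ones_setCell_lt g i j h.2.2.2.2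
      have h1 := ih rows cols (setCell g i j) (i-1) j
      have h2 := ih rows cols (dfs rows cols n (setCell g i j) (i-1) j).1 (i+1) j
      have h3 := ih rows cols (dfs rows cols n (dfs rows cols n (setCell g i j) (i-1) j).1 (i+1) j).1 i (j-1)
      have h4 := ih rows cols (dfs rows cols n (dfs rows cols n (dfs rows cols n (setCell g i j) (i-1) j).1 (i+1) j).1 i (j-1)).1 i (j+1)
      simp only []
      omega

-- the dfs result does not depend on the fuel, as long as the fuel exceeds ones g
theorem dfs_fuel : ∀ (N : Nat) (rows cols : Int) (g : List (List String)) (i j : Int)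
    (f1 f2 : Nat), ones g ≤ N → ones g < f1 → ones g < f2 →
    dfs rows cols f1 g i j = dfs rows cols f2 g i j := by
  intro N
  induction N with
  | zero =>
    intro rows cols g i j f1 f2 hN h1 h2
    obtain ⟨m1, rfl⟩ := Nat.exists_eq_succ_of_ne_zero (by omega : f1 ≠ 0)
    obtain ⟨m2, rfl⟩ := Nat.exists_eq_succ_of_ne_zero (by omega : f2 ≠ 0)
    rw [dfs, dfs]
    split
    · rfl
    · rename_i h
      push_neg at h
      have := ones_setCell_lt g i j h.2.2.2.2
      omega
  | succ N ih =>
    intro rows cols g i j f1 f2 hN h1 h2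
    obtain ⟨m1, rfl⟩ := Nat.exists_eq_succ_of_ne_zero (by omega : f1 ≠ 0)
    obtain ⟨m2, rfl⟩ := Nat.exists_eq_succ_of_ne_zero (by omega : f2 ≠ 0)
    rw [dfs, dfs]
    split
    · rfl
    · rename_i h
      push_neg at h
      have h0 := ones_setCell_lt g i j h.2.2.2.2
      have e1 : dfs rows cols m1 (setCell g i j) (i-1) j
              = dfs rows cols m2 (setCell g i j) (i-1) j :=
        ih rows cols _ _ _ _ _ (by omega) (by omega) (by omega)
      simp only [e1]
      have le1 := dfs_ones_le m2 rows cols (setCell g i j) (i-1) j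
      have e2 : dfs rows cols m1 (dfs rows cols m2 (setCell g i j) (i-1) j).1 (i+1) j
              = dfs rows cols m2 (dfs rows cols m2 (setCell g i j) (i-1) j).1 (i+1) j :=
        ih rows cols _ _ _ _ _ (by omega) (by omega) (by omega)
      simp only [e2]
      have le2 := dfs_ones_le m2 rows cols (dfs rows cols m2 (setCell g i j) (i-1) j).1 (i+1) j
      have e3 : dfs rows cols m1 _ i (j-1) = dfs rows cols m2
          (dfs rows cols m2 (dfs rows cols m2 (setCell g i j) (i-1) j).1 (i+1) j).1 i (j-1) :=
        ih rows cols _ _ _ _ _ (by omega) (by omega) (by omega)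
      simp only [e3]
      have le3 := dfs_ones_le m2 rows cols (dfs rows cols m2 (dfs rows cols m2 (setCell g i j) (i-1) j).1 (i+1) j).1 i (j-1)
      have e4 : dfs rows cols m1 _ i (j+1) = dfs rows cols m2
          (dfs rows cols m2 (dfs rows cols m2 (dfs rows cols m2 (setCell g i j) (i-1) j).1 (i+1) j).1 i (j-1)).1 i (j+1) :=
        ih rows cols _ _ _ _ _ (by omega) (by omega) (by omega)
      simp only [e4]

-- processing the top of the stack completely equals one recursive dfs call
theorem loopFill_pop : ∀ (N : Nat) (rows cols : Int) (g : List (List String)) (i j : Int)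
    (rest : List (Int × Int)) (size : Int), ones g ≤ N →
    loopFill rows cols g ((i, j) :: rest) size =
      loopFill rows cols (dfs rows cols (ones g + 1) g i j).1 rest
        (size + (dfs rows cols (ones g + 1) g i j).2) := by
  intro N
  induction N with
  | zero =>
    intro rows cols g i j rest size hN
    rw [loopFill]
    split
    · rename_i h
      rw [dfs_succ]
      simp only [if_pos h]
      simp
    · rename_i h
      push_neg at h
      have := ones_setCell_lt g i j h.2.2.2.2
      omega
  | succ N ih =>
    intro rows cols g i j rest size hN
    rw [loopFill]
    split
    · rename_i h
      rw [dfs_succ]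
      simp only [if_pos h]
      simp
    · rename_i h
      push_neg at h
      have h0 := ones_setCell_lt g i j h.2.2.2.2
      set g0 := setCell g i j with hg0
      -- unfold the dfs on the right
      conv_rhs => rw [dfs_succ]
      rw [if_neg (by push_neg; exact h)]
      simp only []
      -- names for the four sequential dfs results (with canonical fuel)
      have fuel1 : dfs rows cols (ones g) g0 (i-1) j = dfs rows cols (ones g0 + 1) g0 (i-1) j :=
        dfs_fuel (ones g0) rows cols g0 (i-1) j _ _ (le_refl _) (by omega) (by omega)
      set p1 := dfs rows cols (ones g0 + 1) g0 (i-1) j with hp1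
      have le1 : ones p1.1 ≤ ones g0 := by rw [hp1]; exact dfs_ones_le _ _ _ _ _ _
      have fuel2 : dfs rows cols (ones g) p1.1 (i+1) j = dfs rows cols (ones p1.1 + 1) p1.1 (i+1) j :=
        dfs_fuel (ones p1.1) rows cols p1.1 (i+1) j _ _ (le_refl _) (by omega) (by omega)
      set p2 := dfs rows cols (ones p1.1 + 1) p1.1 (i+1) j with hp2
      have le2 : ones p2.1 ≤ ones p1.1 := by rw [hp2]; exact dfs_ones_le _ _ _ _ _ _
      have fuel3 : dfs rows cols (ones g) p2.1 i (j-1) = dfs rows cols (ones p2.1 + 1) p2.1 i (j-1) :=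
        dfs_fuel (ones p2.1) rows cols p2.1 i (j-1) _ _ (le_refl _) (by omega) (by omega)
      set p3 := dfs rows cols (ones p2.1 + 1) p2.1 i (j-1) with hp3
      have le3 : ones p3.1 ≤ ones p2.1 := by rw [hp3]; exact dfs_ones_le _ _ _ _ _ _
      have fuel4 : dfs rows cols (ones g) p3.1 i (j+1) = dfs rows cols (ones p3.1 + 1) p3.1 i (j+1) :=
        dfs_fuel (ones p3.1) rows cols p3.1 i (j+1) _ _ (le_refl _) (by omega) (by omega)
      set p4 := dfs rows cols (ones p3.1 + 1) p3.1 i (j+1) with hp4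
      rw [fuel1, fuel2, fuel3, fuel4]
      -- now peel the four pushed neighbours off the stack with the IH
      rw [ih rows cols g0 (i-1) j _ _ (by omega), ← hp1,
          ih rows cols p1.1 (i+1) j _ _ (by omega), ← hp2,
          ih rows cols p2.1 i (j-1) _ _ (by omega), ← hp3,
          ih rows cols p3.1 i (j+1) _ _ (by omega), ← hp4]
      congr 1
      ring

theorem loopFill_nil (rows cols : Int) (g : List (List String)) (size : Int) :
    loopFill rows cols g [] size = (g, size) := by rw [loopFill]

theorem fill_eq_dfs (rows cols : Int) (g : List (List String)) (i j : Int) :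
    loopFill rows cols g [(i, j)] 0 = dfs rows cols (ones g + 1) g i j := by
  rw [loopFill_pop (ones g) rows cols g i j [] 0 (le_refl _), loopFill_nil]
  simp

-- ===== VERDICT (by name: the statement is the Claim_ definition above) =====
theorem no_islands_spec : Claim_equal_no_islands := by
  intro grid _ _
  unfold Spec_no_islands
  simp only [no_islands, no_islands_alt, fill_eq_dfs]
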